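-- pv_equiv track=rewrite | github.com/PavelPatsey/aoc_2025_py | 04/04.py | get_answer_2
-- ===== SOURCE A (Python) =====
-- from itertools import product
--
-- DIRS8 = (
--     (-1, -1),
--     (-1, 0),
--     (-1, 1),
--     (0, -1),
--     (0, 1),
--     (1, -1),
--     (1, 0),
--     (1, 1),
-- )
--
-- def in_grid(r, c, grid):
--     rows = len(grid)
--     cols = len(grid[0])
--     return 0 <= r < rows and 0 <= c < cols
--
-- def is_valid(r, c, grid) -> bool:
--     if grid[r][c] == ".":
--         return False
--     count = 0
--     for dr, dc in DIRS8:
--         if in_grid(r + dr, c + dc, grid) and grid[r + dr][c + dc] == "@":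
--             count += 1
--     return count < 4
--
-- def find_valid_points(grid):
--     points = []
--     rows = len(grid)
--     cols = len(grid[0])
--     for r, c in product(range(rows), range(cols)):
--         if is_valid(r, c, grid):
--             points.append((r, c))
--     return points
--
-- def get_answer_2(grid):
--     points = find_valid_points(grid)
--     res = 0
--     while len(points) > 0:
--         res += len(points)
--         for r, c in points:
--             grid[r][c] = "."
--         points = find_valid_points(grid)
--     return res
-- ===== SOURCE B (Python) =====
-- DIRS8 = (
--     (-1, -1),
--     (-1, 0),
--     (-1, 1),
--     (0, -1),
--     (0, 1),
--     (1, -1),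
--     (1, 0),
--     (1, 1),
-- )
--
-- def _cells(grid, pred):
--     rows = len(grid)
--     cols = len(grid[0])
--     return [(r, c) for r in range(rows) for c in range(cols) if pred(grid[r][c])]
--
-- def _deg(p, at_set):
--     return sum(1 for dr, dc in DIRS8 if (p[0] + dr, p[1] + dc) in at_set)
--
-- def get_answer_2(grid):
--     # Cells are peeled round by round; only '@' cells influence neighbour
--     # degrees, so track '@' cells and the other non-'.' cells separately
--     # and shrink those lists instead of rescanning and mutating the grid.
--     ats = _cells(grid, lambda v: v == "@")
--     others = _cells(grid, lambda v: v != "." and v != "@")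
--     res = 0
--     while True:
--         at_set = set(ats)
--         keep_a = [p for p in ats if _deg(p, at_set) >= 4]
--         keep_o = [p for p in others if _deg(p, at_set) >= 4]
--         removed = (len(ats) - len(keep_a)) + (len(others) - len(keep_o))
--         if removed == 0:
--             return res
--         res += removed
--         ats, others = keep_a, keep_o
-- ===== Notes on version B (the rewrite author's own statement) =====
-- stated objective: alternative
-- what changed: Instead of repeatedly rescanning and mutating the whole grid each round, B extracts the '@' cells and the other non-'.' cells once into coordinate lists and peels them round by round, filtering the shrinking lists against a set of surviving '@' cells; the grid is read once and never mutated.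
import Mathlib
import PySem

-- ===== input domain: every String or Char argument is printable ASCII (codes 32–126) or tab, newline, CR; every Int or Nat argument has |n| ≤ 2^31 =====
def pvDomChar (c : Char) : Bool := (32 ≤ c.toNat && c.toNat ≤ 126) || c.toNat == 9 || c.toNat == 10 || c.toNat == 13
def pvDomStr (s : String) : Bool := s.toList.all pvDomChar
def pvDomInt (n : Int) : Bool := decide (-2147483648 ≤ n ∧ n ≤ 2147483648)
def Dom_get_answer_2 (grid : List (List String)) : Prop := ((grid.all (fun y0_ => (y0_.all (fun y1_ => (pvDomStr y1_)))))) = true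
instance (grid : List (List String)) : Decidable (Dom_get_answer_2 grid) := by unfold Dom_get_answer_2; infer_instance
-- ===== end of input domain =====

-- B replaces A's repeated whole-grid rescan-and-mutate rounds by peeling two coordinate
-- lists (the '@' cells and the other non-'.' cells) built once from the grid; equivalence
-- is about the return value only: Python A mutates its grid argument in place, B does not.

-- ===== PORT A =====
def pvDirs8 : List (Int × Int) :=
  [(-1, -1), (-1, 0), (-1, 1), (0, -1), (0, 1), (1, -1), (1, 0), (1, 1)]

-- grid[r][c] (both ports read cells the same way; total form, in range under Pre_)
def pvCell (g : List (List String)) (r c : Int) : String :=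
  PySem.List.pyGetD (PySem.List.pyGetD g r []) c ""

def in_grid (r c : Int) (g : List (List String)) : Bool :=
  decide (0 ≤ r ∧ r < (g.length : Int) ∧ 0 ≤ c ∧ c < ((PySem.List.pyGetD g 0 []).length : Int))

def is_valid (r c : Int) (g : List (List String)) : Bool :=
  if pvCell g r c == "." then false
  else
    (pvDirs8.foldl (fun count d =>
      if in_grid (r + d.1) (c + d.2) g && (pvCell g (r + d.1) (c + d.2) == "@")
      then count + 1 else count) (0 : Int)) < 4

def find_valid_points (g : List (List String)) : List (Int × Int) :=
  (PySem.List.pyRange 0 (g.length : Int) 1).flatMap (fun r =>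
    (PySem.List.pyRange 0 ((PySem.List.pyGetD g 0 []).length : Int) 1).filterMap (fun c =>
      if is_valid r c g then some (r, c) else none))

def pvSetDot (g : List (List String)) (p : Int × Int) : List (List String) :=
  PySem.List.pySetD g p.1 (PySem.List.pySetD (PySem.List.pyGetD g p.1 []) p.2 ".")

-- the while-loop; fuel rows*cols+1 always suffices: every nonempty round turns at
-- least one non-'.' cell into '.'
def pvLoopA : Nat → List (List String) → List (Int × Int) → Int → Int
  | 0, _, _, res => res
  | fuel + 1, g, pts, res =>
    if 0 < pts.length then
      let g' := pts.foldl pvSetDot g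
      pvLoopA fuel g' (find_valid_points g') (res + pts.length)
    else res

def get_answer_2 (grid : List (List String)) : Int :=
  pvLoopA (grid.length * (PySem.List.pyGetD grid 0 []).length + 1)
    grid (find_valid_points grid) 0

-- ===== PORT B =====
def pvCellsB (g : List (List String)) (pred : String → Bool) : List (Int × Int) :=
  (PySem.List.pyRange 0 (g.length : Int) 1).flatMap (fun r =>
    (PySem.List.pyRange 0 ((PySem.List.pyGetD g 0 []).length : Int) 1).filterMap (fun c =>
      if pred (pvCell g r c) then some (r, c) else none))

def pvDeg (p : Int × Int) (atSet : PySem.Set (Int × Int)) : Int :=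
  pvDirs8.foldl (fun s d =>
    if PySem.Set.contains atSet (p.1 + d.1, p.2 + d.2) then s + 1 else s) 0

-- the while True loop of Source B; same sufficient fuel bound as A's port
def pvLoopB : Nat → List (Int × Int) → List (Int × Int) → Int → Int
  | 0, _, _, res => res
  | fuel + 1, ats, others, res =>
    let atSet := PySem.Set.ofList ats
    let keepA := ats.filter (fun p => 4 ≤ pvDeg p atSet)
    let keepO := others.filter (fun p => 4 ≤ pvDeg p atSet)
    let removed : Int := ((ats.length : Int) - (keepA.length : Int))
      + ((others.length : Int) - (keepO.length : Int))
    if removed == 0 then res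
    else pvLoopB fuel keepA keepO (res + removed)

def get_answer_2_alt (grid : List (List String)) : Int :=
  pvLoopB (grid.length * (PySem.List.pyGetD grid 0 []).length + 1)
    (pvCellsB grid (fun v => v == "@"))
    (pvCellsB grid (fun v => v != "." && v != "@"))
    0

-- ===== PRECONDITION & SPEC =====
-- Pre_ is exactly where Python A returns: it raises IndexError on an empty grid
-- (grid[0]) and whenever some row is shorter than the first row (grid[r][c] with
-- c < len(grid[0]) while scanning); nothing else is excluded.
def Pre_get_answer_2 (grid : List (List String)) : Prop :=
  grid ≠ [] ∧ ∀ row ∈ grid, (PySem.List.pyGetD grid 0 []).length ≤ row.length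
instance (grid : List (List String)) : Decidable (Pre_get_answer_2 grid) := by
  unfold Pre_get_answer_2; infer_instance

def pvWitness_get_answer_2 : List (List String) := [["@", "@"], ["@", "."]]

def Spec_get_answer_2 (grid : List (List String)) (out : Int) : Prop := out = get_answer_2_alt grid
instance (grid : List (List String)) (out : Int) : Decidable (Spec_get_answer_2 grid out) := by
  unfold Spec_get_answer_2; infer_instance

-- ===== CLAIM (what is proved, stated in full; the proofs are below) =====
def Claim_equal_get_answer_2 : Prop := ∀ (grid : List (List String)), Dom_get_answer_2 grid → Pre_get_answer_2 grid → Spec_get_answer_2 grid (get_answer_2 grid)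

-- ===== LEMMAS AND PROOFS =====

-- number of columns the scans use
def pvCols (g : List (List String)) : Nat := (PySem.List.pyGetD g 0 []).length

-- the common row-major selection shape of find_valid_points / pvCellsB
def pvSel (g : List (List String)) (P : Int → Int → Bool) : List (Int × Int) :=
  (PySem.List.pyRange 0 (g.length : Int) 1).flatMap (fun r =>
    (PySem.List.pyRange 0 ((PySem.List.pyGetD g 0 []).length : Int) 1).filterMap (fun c =>
      if P r c then some (r, c) else none))

-- every row long enough for the scanned columns (from Pre_, preserved by the updates)
def pvInv (g : List (List String)) : Prop := ∀ row ∈ g, pvCols g ≤ row.length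

theorem pvSel_fvp (g : List (List String)) :
    find_valid_points g = pvSel g (fun r c => is_valid r c g) := rfl

theorem pvSel_cellsB (g : List (List String)) (pred : String → Bool) :
    pvCellsB g pred = pvSel g (fun r c => pred (pvCell g r c)) := rfl

theorem pvSel_mem (g : List (List String)) (P : Int → Int → Bool) (q : Int × Int) :
    q ∈ pvSel g P ↔
      0 ≤ q.1 ∧ q.1 < (g.length : Int) ∧ 0 ≤ q.2 ∧ q.2 < (pvCols g : Int) ∧ P q.1 q.2 := by
  obtain ⟨r, c⟩ := q
  simp only [pvSel, pvCols, List.mem_flatMap, List.mem_filterMap, PySem.List.mem_pyRange_one]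
  constructor
  · rintro ⟨r', ⟨h1, h2⟩, c', ⟨h3, h4⟩, h5⟩
    split at h5 <;> simp_all
  · rintro ⟨h1, h2, h3, h4, h5⟩
    exact ⟨r, ⟨h1, h2⟩, c, ⟨h3, h4⟩, by simp [h5]⟩

theorem pvSel_congr (g : List (List String)) (P Q : Int → Int → Bool)
    (h : ∀ r c, 0 ≤ r → r < (g.length : Int) → 0 ≤ c → c < (pvCols g : Int) → P r c = Q r c) :
    pvSel g P = pvSel g Q := by
  unfold pvSel
  refine List.flatMap_congr (fun r hr => List.filterMap_congr (fun c hc => ?_))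
  rw [PySem.List.mem_pyRange_one] at hr hc
  rw [h r c hr.1 hr.2 hc.1 hc.2]

theorem pvSel_filter (g : List (List String)) (P : Int → Int → Bool) (Q : Int × Int → Bool) :
    (pvSel g P).filter Q = pvSel g (fun r c => P r c && Q (r, c)) := by
  unfold pvSel
  rw [List.filter_flatMap]
  refine List.flatMap_congr (fun r hr => ?_)
  rw [List.filter_filterMap]
  refine List.filterMap_congr (fun c hc => ?_)
  by_cases h : P r c <;> by_cases h2 : Q (r, c) <;> simp [h, h2, Option.filter]

theorem pvSel_dims (g g' : List (List String)) (P : Int → Int → Bool)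
    (h1 : g'.length = g.length) (h2 : pvCols g' = pvCols g) :
    pvSel g' P = pvSel g P := by
  unfold pvCols at h2
  unfold pvSel
  rw [h1, h2]

-- the two degree computations agree
theorem pvDeg_cond (g : List (List String)) (q : Int × Int) :
    PySem.Set.contains (PySem.Set.ofList (pvCellsB g (fun v => v == "@"))) q =
      (in_grid q.1 q.2 g && (pvCell g q.1 q.2 == "@")) := by
  rw [Bool.eq_iff_iff]
  simp only [PySem.Set.contains_iff, PySem.Set.mem_ofList, pvSel_cellsB, pvSel_mem,
    in_grid, Bool.and_eq_true, decide_eq_true_eq, pvCols]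
  tauto

theorem pvDeg_eq (g : List (List String)) (r c : Int) :
    pvDeg (r, c) (PySem.Set.ofList (pvCellsB g (fun v => v == "@"))) =
      pvDirs8.foldl (fun count d =>
        if in_grid (r + d.1) (c + d.2) g && (pvCell g (r + d.1) (c + d.2) == "@")
        then count + 1 else count) 0 := by
  unfold pvDeg
  congr 1
  funext s d
  rw [pvDeg_cond g (r + d.1, c + d.2)]

-- cell bounds (relative to g's dimensions)
def pvBnd (g : List (List String)) (p : Int × Int) : Prop :=
  0 ≤ p.1 ∧ p.1 < (g.length : Int) ∧ 0 ≤ p.2 ∧ p.2 < (pvCols g : Int)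

theorem pvGetD_set {α : Type} (l : List α) (i : Nat) (v : α) (j : Nat) (d : α) :
    (l.set i v).getD j d = if i = j ∧ i < l.length then v else l.getD j d := by
  rw [List.getD_eq_getElem?_getD, List.getD_eq_getElem?_getD, List.getElem?_set]
  by_cases h1 : i = j <;> by_cases h2 : i < l.length
  · subst h1
    simp [h2]
  · subst h1
    rw [List.getElem?_eq_none (by omega)]
    simp [h2]
  · simp [h1]
  · simp [h1]

theorem pvLength_setDot (g : List (List String)) (p : Int × Int) :
    (pvSetDot g p).length = g.length := by
  unfold pvSetDot; rw [PySem.List.length_pySetD]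

theorem pvSetDot_eq_set (g : List (List String)) (p : Int × Int) (hp1 : 0 ≤ p.1)
    (hp3 : 0 ≤ p.2) :
    pvSetDot g p = g.set p.1.toNat ((g.getD p.1.toNat []).set p.2.toNat ".") := by
  unfold pvSetDot
  rw [PySem.List.pySetD_of_nonneg _ _ hp1, PySem.List.pyGetD_of_nonneg _ _ hp1,
    PySem.List.pySetD_of_nonneg _ _ hp3]

theorem pvCols_setDot (g : List (List String)) (p : Int × Int) (hp : pvBnd g p) :
    pvCols (pvSetDot g p) = pvCols g := by
  obtain ⟨hp1, hp2, hp3, hp4⟩ := hp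
  rw [pvSetDot_eq_set g p hp1 hp3]
  unfold pvCols
  rw [PySem.List.pyGetD_zero, PySem.List.pyGetD_zero, pvGetD_set]
  split_ifs with h
  · rw [List.length_set, ← h.1]
  · rfl

theorem pvInv_setDot (g : List (List String)) (p : Int × Int) (hInv : pvInv g)
    (hp : pvBnd g p) : pvInv (pvSetDot g p) := by
  intro row hrow
  rw [pvCols_setDot g p hp]
  obtain ⟨hp1, hp2, hp3, hp4⟩ := hp
  rw [pvSetDot_eq_set g p hp1 hp3] at hrow
  rcases List.mem_or_eq_of_mem_set hrow with h | h
  · exact hInv row h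
  · have hlt : p.1.toNat < g.length := by omega
    have hmem : g.getD p.1.toNat [] ∈ g := by
      rw [List.getD_eq_getElem?_getD, List.getElem?_eq_getElem hlt]
      exact List.getElem_mem hlt
    rw [h, List.length_set]
    exact hInv _ hmem

theorem pvCell_setDot (g : List (List String)) (p q : Int × Int)
    (hInv : pvInv g) (hp : pvBnd g p) (hq : pvBnd g q) :
    pvCell (pvSetDot g p) q.1 q.2 = if q = p then "." else pvCell g q.1 q.2 := by
  obtain ⟨hp1, hp2, hp3, hp4⟩ := hp
  obtain ⟨hq1, hq2, hq3, hq4⟩ := hq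
  have hrowlen : pvCols g ≤ (g.getD p.1.toNat []).length := by
    have hlt : p.1.toNat < g.length := by omega
    have hmem : g.getD p.1.toNat [] ∈ g := by
      rw [List.getD_eq_getElem?_getD, List.getElem?_eq_getElem hlt]
      exact List.getElem_mem hlt
    exact hInv _ hmem
  rw [pvSetDot_eq_set g p hp1 hp3]
  unfold pvCell
  rw [PySem.List.pyGetD_of_nonneg _ _ hq1, pvGetD_set,
    PySem.List.pyGetD_of_nonneg _ _ hq1]
  by_cases hqp : q = p
  · subst hqp
    rw [if_pos rfl, if_pos ⟨rfl, by omega⟩, PySem.List.pyGetD_of_nonneg _ _ hq3,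
      pvGetD_set, if_pos ⟨rfl, by omega⟩]
  · rw [if_neg hqp]
    by_cases hr : p.1.toNat = q.1.toNat
    · have hq1p : q.1 = p.1 := by omega
      have hne : ¬ (p.2.toNat = q.2.toNat) := by
        intro hc
        exact hqp (Prod.ext_iff.mpr ⟨hq1p, by omega⟩)
      rw [if_pos ⟨hr, by omega⟩, PySem.List.pyGetD_of_nonneg _ _ hq3, pvGetD_set,
        if_neg (fun hc => hne hc.1), PySem.List.pyGetD_of_nonneg _ _ hq3, hr]
    · rw [if_neg (fun hc => hr hc.1)]

theorem pvBnd_iff_of_dims (g g' : List (List String)) (p : Int × Int)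
    (h1 : g'.length = g.length) (h2 : pvCols g' = pvCols g) : pvBnd g' p ↔ pvBnd g p := by
  unfold pvBnd; rw [h1, h2]

theorem pvFoldl_setDot_dims : ∀ (l : List (Int × Int)) (g : List (List String)),
    pvInv g → (∀ p ∈ l, pvBnd g p) →
    (l.foldl pvSetDot g).length = g.length ∧ pvCols (l.foldl pvSetDot g) = pvCols g ∧
      pvInv (l.foldl pvSetDot g) := by
  intro l
  induction l with
  | nil => intro g hInv _; exact ⟨rfl, rfl, hInv⟩
  | cons p t ih =>
    intro g hInv hb
    have hp := hb p List.mem_cons_self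
    have h1 := pvLength_setDot g p
    have h2 := pvCols_setDot g p hp
    have hInv' := pvInv_setDot g p hInv hp
    obtain ⟨a, b, c⟩ := ih (pvSetDot g p) hInv' (fun q hq => by
      exact (pvBnd_iff_of_dims g (pvSetDot g p) q h1 h2).mpr (hb q (List.mem_cons_of_mem _ hq)))
    exact ⟨by rw [List.foldl_cons, a, h1], by rw [List.foldl_cons, b, h2], by rw [List.foldl_cons]; exact c⟩

theorem pvCell_foldl_setDot : ∀ (l : List (Int × Int)) (g : List (List String)),
    pvInv g → (∀ p ∈ l, pvBnd g p) → ∀ q, pvBnd g q →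
    pvCell (l.foldl pvSetDot g) q.1 q.2 = if q ∈ l then "." else pvCell g q.1 q.2 := by
  intro l
  induction l with
  | nil => intro g _ _ q _; simp
  | cons p t ih =>
    intro g hInv hb q hq
    have hp := hb p List.mem_cons_self
    have h1 := pvLength_setDot g p
    have h2 := pvCols_setDot g p hp
    have hInv' := pvInv_setDot g p hInv hp
    rw [List.foldl_cons]
    rw [ih (pvSetDot g p) hInv' (fun r hr =>
        (pvBnd_iff_of_dims g (pvSetDot g p) r h1 h2).mpr (hb r (List.mem_cons_of_mem _ hr)))
      q ((pvBnd_iff_of_dims g (pvSetDot g p) q h1 h2).mpr hq)]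
    rw [pvCell_setDot g p q hInv hp hq]
    by_cases hqt : q ∈ t <;> by_cases hqp : q = p <;>
      simp [hqt, hqp, List.mem_cons]

-- Bool bookkeeping for the two filter directions
theorem pvNotLe (n : Int) : decide (n < 4) = !decide (4 ≤ n) := by
  rw [← decide_not]
  exact decide_eq_decide.mpr (by omega)

theorem pvIsValid_eq (g : List (List String)) (r c : Int) :
    is_valid r c g =
      (!(pvCell g r c == ".") &&
        decide (pvDeg (r, c) (PySem.Set.ofList (pvCellsB g (fun v => v == "@"))) < 4)) := by
  unfold is_valid
  rw [pvDeg_eq]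
  by_cases h : pvCell g r c == "." <;> simp [h]

theorem pvPtsBnd (g : List (List String)) (q : Int × Int)
    (hq : q ∈ find_valid_points g) : pvBnd g q := by
  rw [pvSel_fvp, pvSel_mem] at hq
  exact ⟨hq.1, hq.2.1, hq.2.2.1, hq.2.2.2.1⟩

theorem pvPtsMem (g : List (List String)) (q : Int × Int) :
    q ∈ find_valid_points g ↔ (pvBnd g q ∧ is_valid q.1 q.2 g) := by
  rw [pvSel_fvp, pvSel_mem]
  unfold pvBnd
  tauto

theorem pvCellsB_filter (g : List (List String)) (P : String → Bool) (Q : Int × Int → Bool) :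
    (pvCellsB g P).filter Q = pvSel g (fun r c => P (pvCell g r c) && Q (r, c)) := by
  rw [pvSel_cellsB, pvSel_filter]

theorem pvFvp_filter (g : List (List String)) (Q : Int × Int → Bool) :
    (find_valid_points g).filter Q = pvSel g (fun r c => is_valid r c g && Q (r, c)) := by
  rw [pvSel_fvp, pvSel_filter]

-- the per-round removal count of B equals the number of A's valid points
theorem pvRemoved_eq (g : List (List String)) :
    (((pvCellsB g (fun v => v == "@")).length : Int) -
        (((pvCellsB g (fun v => v == "@")).filter (fun p => 4 ≤ pvDeg p (PySem.Set.ofList (pvCellsB g (fun v => v == "@"))))).length : Int)) +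
      (((pvCellsB g (fun v => v != "." && v != "@")).length : Int) -
        (((pvCellsB g (fun v => v != "." && v != "@")).filter (fun p => 4 ≤ pvDeg p (PySem.Set.ofList (pvCellsB g (fun v => v == "@"))))).length : Int)) =
      ((find_valid_points g).length : Int) := by
  have hA : (find_valid_points g).filter (fun q => pvCell g q.1 q.2 == "@") =
      (pvCellsB g (fun v => v == "@")).filter
        (fun p => !decide (4 ≤ pvDeg p (PySem.Set.ofList (pvCellsB g (fun v => v == "@"))))) := by
    rw [pvFvp_filter, pvCellsB_filter]
    apply pvSel_congr
    intro r c _ _ _ _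
    rw [pvIsValid_eq]
    by_cases hv : pvCell g r c = "@"
    · simp [hv, pvNotLe]
    · have h := beq_eq_false_iff_ne.mpr hv
      simp [h]
  have hO : (find_valid_points g).filter (fun q => !(pvCell g q.1 q.2 == "@")) =
      (pvCellsB g (fun v => v != "." && v != "@")).filter
        (fun p => !decide (4 ≤ pvDeg p (PySem.Set.ofList (pvCellsB g (fun v => v == "@"))))) := by
    rw [pvFvp_filter, pvCellsB_filter]
    apply pvSel_congr
    intro r c _ _ _ _
    rw [pvIsValid_eq]
    by_cases hv : pvCell g r c = "."
    · simp [hv]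
    · by_cases hv2 : pvCell g r c = "@"
      · simp [hv2]
      · simp only [bne]
        rw [pvNotLe, Bool.and_right_comm]
  have hsplit := List.length_eq_length_filter_add
    (l := find_valid_points g) (fun q => pvCell g q.1 q.2 == "@")
  have hA' := List.length_eq_length_filter_add
    (l := pvCellsB g (fun v => v == "@"))
    (fun p => 4 ≤ pvDeg p (PySem.Set.ofList (pvCellsB g (fun v => v == "@"))))
  have hO' := List.length_eq_length_filter_add
    (l := pvCellsB g (fun v => v != "." && v != "@"))
    (fun p => 4 ≤ pvDeg p (PySem.Set.ofList (pvCellsB g (fun v => v == "@"))))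
  rw [hA, hO] at hsplit
  omega

-- after a round, B's kept lists are exactly the lists built from A's updated grid
theorem pvKeep_eq (g : List (List String)) (hInv : pvInv g) (P : String → Bool)
    (hdot : P "." = false)
    (hsub : ∀ v, P v = true → v ≠ ".") :
    (pvCellsB g P).filter
        (fun p => 4 ≤ pvDeg p (PySem.Set.ofList (pvCellsB g (fun v => v == "@")))) =
      pvCellsB ((find_valid_points g).foldl pvSetDot g) P := by
  have hb : ∀ p ∈ find_valid_points g, pvBnd g p := fun p hp => pvPtsBnd g p hp
  obtain ⟨hlen, hcols, hInv'⟩ := pvFoldl_setDot_dims (find_valid_points g) g hInv hb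
  rw [pvCellsB_filter, pvSel_cellsB _ P,
    pvSel_dims g ((find_valid_points g).foldl pvSetDot g) _ hlen hcols]
  apply pvSel_congr
  intro r c hr1 hr2 hc1 hc2
  rw [pvCell_foldl_setDot (find_valid_points g) g hInv hb (r, c) ⟨hr1, hr2, hc1, hc2⟩]
  by_cases hmem : (r, c) ∈ find_valid_points g
  · rw [if_pos hmem, hdot]
    have hval := ((pvPtsMem g (r, c)).mp hmem).2
    rw [pvIsValid_eq] at hval
    have : decide (4 ≤ pvDeg (r, c) (PySem.Set.ofList (pvCellsB g (fun v => v == "@")))) = false := by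
      rw [pvNotLe] at hval
      rcases Bool.and_eq_true_iff.mp hval with ⟨_, h2⟩
      simpa using h2
    rw [this, Bool.and_false]
  · rw [if_neg hmem]
    by_cases hP : P (pvCell g r c) = true
    · have hval : is_valid r c g = false := by
        cases h : is_valid r c g
        · rfl
        · exact absurd ((pvPtsMem g (r, c)).mpr ⟨⟨hr1, hr2, hc1, hc2⟩, h⟩) hmem
      rw [pvIsValid_eq] at hval
      have hne : (pvCell g r c == ".") = false := beq_eq_false_iff_ne.mpr (hsub _ hP)
      rw [hne, pvNotLe] at hval
      simp only [Bool.not_false, Bool.true_and, Bool.not_eq_false'] at hval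
      rw [hval, Bool.and_true]
    · rw [Bool.not_eq_true] at hP
      rw [hP, Bool.false_and]

theorem pvLoop_eq : ∀ (fuel : Nat) (g : List (List String)) (res : Int), pvInv g →
    pvLoopA fuel g (find_valid_points g) res =
      pvLoopB fuel (pvCellsB g (fun v => v == "@"))
        (pvCellsB g (fun v => v != "." && v != "@")) res := by
  intro fuel
  induction fuel with
  | zero => intro g res _; rfl
  | succ n ih =>
    intro g res hInv
    have hrem := pvRemoved_eq g
    have hb : ∀ p ∈ find_valid_points g, pvBnd g p := fun p hp => pvPtsBnd g p hp
    obtain ⟨hlen, hcols, hInv'⟩ := pvFoldl_setDot_dims (find_valid_points g) g hInv hb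
    have hKA := pvKeep_eq g hInv (fun v => v == "@") rfl
      (fun v hv => by rw [beq_iff_eq] at hv; simp [hv])
    have hKO := pvKeep_eq g hInv (fun v => v != "." && v != "@") rfl
      (fun v hv => bne_iff_ne.mp (Bool.and_eq_true_iff.mp hv).1)
    simp only [pvLoopA, pvLoopB]
    by_cases h : 0 < (find_valid_points g).length
    · rw [if_pos h, if_neg (by
        rw [beq_iff_eq, hrem]
        omega)]
      rw [hrem, hKA, hKO]
      exact ih ((find_valid_points g).foldl pvSetDot g) (res + ((find_valid_points g).length : Int)) hInv'
    · rw [if_neg h, if_pos (by rw [beq_iff_eq, hrem]; omega)]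

theorem get_answer_2_spec : Claim_equal_get_answer_2 := by
  intro grid _ hPre
  unfold Spec_get_answer_2 get_answer_2 get_answer_2_alt
  exact pvLoop_eq _ grid 0 (fun row hrow => hPre.2 row hrow)
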